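-- pv_equiv track=rewrite | github.com/alaporta85/fanta2_0 | mantraAL/mantra_functions2.py | all_players_are_different
-- ===== SOURCE A (Python) =====
-- def all_players_are_different(list1, list2, list3):
--
--     '''This function checks if the intersection between three lists is zero.
--        It is used to check if there are NOT repeated players in all the
--        possible combinations of defenses, midfields and attacks that will be
--        generated. If intersection is equal to 0 it means that are players are
--        different and the lineup MIGHT be a valid one (there will be more
--        filters).'''
--
--     # From the given lists we create other lists containing only the name of
--     # the players
--     new_list1 = [player[1] for player in list1]
--     new_list2 = [player[1] for player in list2]
--     new_list3 = [player[1] for player in list3]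
--
--     if (len(set(new_list1).intersection(new_list2)) == 0
--     and len(set(new_list1).intersection(new_list3)) == 0
--     and len(set(new_list2).intersection(new_list3)) == 0):
--         return True
--     else:
--         return False
-- ===== SOURCE B (Python) =====
-- def all_players_are_different(list1, list2, list3):
--     s1 = {player[1] for player in list1}
--     s2 = {player[1] for player in list2}
--     s3 = {player[1] for player in list3}
--     return len(s1) + len(s2) + len(s3) == len(s1 | s2 | s3)
-- ===== Notes on version B (the rewrite author's own statement) =====
-- stated objective: simpler
-- what changed: Replaces the three pairwise set-intersection emptiness tests (with short-circuit) by a single union-and-cardinality comparison: the three name sets are pairwise disjoint iff the size of their union equals the sum of their sizes.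
import Mathlib
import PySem

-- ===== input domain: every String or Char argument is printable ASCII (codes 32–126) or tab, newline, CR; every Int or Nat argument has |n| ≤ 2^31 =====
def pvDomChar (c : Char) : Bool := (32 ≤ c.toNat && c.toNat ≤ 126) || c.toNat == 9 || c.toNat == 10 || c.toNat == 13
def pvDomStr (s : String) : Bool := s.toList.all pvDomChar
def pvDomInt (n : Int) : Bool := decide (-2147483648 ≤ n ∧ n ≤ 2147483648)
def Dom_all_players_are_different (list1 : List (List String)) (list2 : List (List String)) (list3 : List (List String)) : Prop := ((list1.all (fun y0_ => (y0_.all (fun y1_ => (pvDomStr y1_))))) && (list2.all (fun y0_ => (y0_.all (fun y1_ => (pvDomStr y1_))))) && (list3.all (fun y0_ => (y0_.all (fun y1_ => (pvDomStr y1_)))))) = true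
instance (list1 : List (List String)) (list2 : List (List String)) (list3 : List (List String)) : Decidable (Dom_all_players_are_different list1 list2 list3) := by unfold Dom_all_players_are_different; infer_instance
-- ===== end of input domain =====

-- ===== PORT A =====
-- B changes only the return value computation; A's behaviour on lists whose inner
-- lists are too short (IndexError) is excluded by Pre_ below.
def all_players_are_different (list1 : List (List String)) (list2 : List (List String)) (list3 : List (List String)) : Bool :=
  let new_list1 := list1.map (fun player => PySem.List.pyGetD player 1 "")
  let new_list2 := list2.map (fun player => PySem.List.pyGetD player 1 "")
  let new_list3 := list3.map (fun player => PySem.List.pyGetD player 1 "")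
  if PySem.Set.len (PySem.Set.inter (PySem.Set.ofList new_list1) new_list2) == 0
      && PySem.Set.len (PySem.Set.inter (PySem.Set.ofList new_list1) new_list3) == 0
      && PySem.Set.len (PySem.Set.inter (PySem.Set.ofList new_list2) new_list3) == 0
  then true else false

-- ===== PORT B =====
def all_players_are_different_alt (list1 : List (List String)) (list2 : List (List String)) (list3 : List (List String)) : Bool :=
  let s1 : PySem.Set String := PySem.Set.ofList (list1.map (fun player => PySem.List.pyGetD player 1 ""))
  let s2 : PySem.Set String := PySem.Set.ofList (list2.map (fun player => PySem.List.pyGetD player 1 ""))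
  let s3 : PySem.Set String := PySem.Set.ofList (list3.map (fun player => PySem.List.pyGetD player 1 ""))
  PySem.Set.len s1 + PySem.Set.len s2 + PySem.Set.len s3
    == PySem.Set.len (PySem.Set.union (PySem.Set.union s1 s2) s3)

-- ===== PRECONDITION & SPEC =====
-- Pre_ excludes exactly the inputs on which the Python A raises IndexError:
-- some player list with fewer than 2 entries, where player[1] is out of range.
def Pre_all_players_are_different (list1 : List (List String)) (list2 : List (List String)) (list3 : List (List String)) : Prop :=
  (∀ p ∈ list1, 2 ≤ p.length) ∧ (∀ p ∈ list2, 2 ≤ p.length) ∧ (∀ p ∈ list3, 2 ≤ p.length)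
instance (list1 : List (List String)) (list2 : List (List String)) (list3 : List (List String)) : Decidable (Pre_all_players_are_different list1 list2 list3) := by unfold Pre_all_players_are_different; infer_instance
def pvWitness_all_players_are_different : List (List String) × List (List String) × List (List String) :=
  ([["1", "a"]], [["2", "b"]], [["3", "c"]])

def Spec_all_players_are_different (list1 : List (List String)) (list2 : List (List String)) (list3 : List (List String)) (out : Bool) : Prop := out = all_players_are_different_alt list1 list2 list3
instance (list1 : List (List String)) (list2 : List (List String)) (list3 : List (List String)) (out : Bool) : Decidable (Spec_all_players_are_different list1 list2 list3 out) := by unfold Spec_all_players_are_different; infer_instance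

-- ===== CLAIM (what is proved, stated in full; the proofs are below) =====
def Claim_equal_all_players_are_different : Prop := ∀ (list1 : List (List String)) (list2 : List (List String)) (list3 : List (List String)), Dom_all_players_are_different list1 list2 list3 → Pre_all_players_are_different list1 list2 list3 → Spec_all_players_are_different list1 list2 list3 (all_players_are_different list1 list2 list3)

-- ===== LEMMAS AND PROOFS =====
-- generic core lemma over any three name lists
theorem pv_core {n1 n2 n3 : List String} :
    (PySem.Set.len (PySem.Set.inter (PySem.Set.ofList n1) n2) == 0
      && PySem.Set.len (PySem.Set.inter (PySem.Set.ofList n1) n3) == 0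
      && PySem.Set.len (PySem.Set.inter (PySem.Set.ofList n2) n3) == 0)
    = (PySem.Set.len (PySem.Set.ofList n1) + PySem.Set.len (PySem.Set.ofList n2)
        + PySem.Set.len (PySem.Set.ofList n3)
      == PySem.Set.len (PySem.Set.union (PySem.Set.union (PySem.Set.ofList n1) (PySem.Set.ofList n2)) (PySem.Set.ofList n3))) := by
  set a := PySem.Set.ofList n1 with ha
  set b := PySem.Set.ofList n2 with hb
  set c := PySem.Set.ofList n3 with hc
  have hbn : b.Nodup := PySem.Set.nodup_ofList n2
  have hcn : c.Nodup := PySem.Set.nodup_ofList n3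
  set fb := b.filter (fun y => !(PySem.Set.contains a y)) with hfbd
  set fc := c.filter (fun y => !(PySem.Set.contains (PySem.Set.union a b) y)) with hfcd
  have hu1 : PySem.Set.union a b = a ++ fb := by
    show PySem.Set.update a b = _
    rw [PySem.Set.update_eq_append_filter, PySem.Set.ofList_eq_self_of_nodup _ hbn]
  have hu2 : PySem.Set.union (PySem.Set.union a b) c = PySem.Set.union a b ++ fc := by
    show PySem.Set.update _ c = _
    rw [PySem.Set.update_eq_append_filter, PySem.Set.ofList_eq_self_of_nodup _ hcn]
  have lb : fb.length ≤ b.length := List.length_filter_le _ b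
  have lc : fc.length ≤ c.length := List.length_filter_le _ c
  have hlen : (PySem.Set.union (PySem.Set.union a b) c).length = a.length + fb.length + fc.length := by
    rw [hu2, List.length_append, hu1, List.length_append]
  have hmemb : ∀ x, x ∈ b ↔ x ∈ n2 := fun x => hb ▸ PySem.Set.mem_ofList n2 x
  have hmemc : ∀ x, x ∈ c ↔ x ∈ n3 := fun x => hc ▸ PySem.Set.mem_ofList n3 x
  have hmema : ∀ x, x ∈ a ↔ x ∈ n1 := fun x => ha ▸ PySem.Set.mem_ofList n1 x
  rw [Bool.eq_iff_iff]
  simp only [PySem.Set.len, PySem.Set.inter, beq_iff_eq, Bool.and_eq_true,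
    Nat.cast_eq_zero, List.length_eq_zero_iff, List.filter_eq_nil_iff, hlen,
    PySem.Set.contains_iff]
  have hcast : ((a.length : Int) + b.length + c.length = ((a.length + fb.length + fc.length : Nat) : Int))
      ↔ (b.length + c.length = fb.length + fc.length) := by push_cast; omega
  rw [hcast]
  constructor
  · rintro ⟨⟨h12, h13⟩, h23⟩
    have hfb : fb.length = b.length := by
      rw [hfbd, List.length_filter_eq_length_iff]
      intro x hx
      simp only [Bool.not_eq_eq_eq_not, Bool.not_true, ← Bool.not_eq_true, PySem.Set.contains_iff]
      intro hxa
      exact h12 x hxa ((hmemb x).mp hx)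
    have hfc : fc.length = c.length := by
      rw [hfcd, List.length_filter_eq_length_iff]
      intro x hx
      simp only [Bool.not_eq_eq_eq_not, Bool.not_true, ← Bool.not_eq_true, PySem.Set.contains_iff,
        hu1, List.mem_append, hfbd, List.mem_filter]
      rintro (hxa | ⟨hxb, -⟩)
      · exact h13 x hxa ((hmemc x).mp hx)
      · exact h23 x hxb ((hmemc x).mp hx)
    omega
  · intro h
    have hfb : fb.length = b.length := by omega
    have hfc : fc.length = c.length := by omega
    rw [hfbd, List.length_filter_eq_length_iff] at hfb
    rw [hfcd, List.length_filter_eq_length_iff] at hfc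
    simp only [Bool.not_eq_eq_eq_not, Bool.not_true, ← Bool.not_eq_true,
      PySem.Set.contains_iff] at hfb hfc
    refine ⟨⟨?_, ?_⟩, ?_⟩
    · intro x hxa hx2
      exact hfb x ((hmemb x).mpr hx2) hxa
    · intro x hxa hx3
      exact hfc x ((hmemc x).mpr hx3) (by rw [hu1]; exact List.mem_append.mpr (Or.inl hxa))
    · intro x hxb hx3
      by_cases hxa : x ∈ a
      · exact hfc x ((hmemc x).mpr hx3) (by rw [hu1]; exact List.mem_append.mpr (Or.inl hxa))
      · refine hfc x ((hmemc x).mpr hx3) (by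
          rw [hu1]
          refine List.mem_append.mpr (Or.inr ?_)
          rw [hfbd, List.mem_filter]
          exact ⟨hxb, by simpa [PySem.Set.contains_iff] using hxa⟩)

theorem pv_main (list1 list2 list3 : List (List String)) :
    all_players_are_different list1 list2 list3 = all_players_are_different_alt list1 list2 list3 := by
  simp only [all_players_are_different, all_players_are_different_alt]
  rw [← pv_core]
  split_ifs with h
  · exact h.symm
  · simp only [Bool.not_eq_true] at h
    exact h.symm

-- ===== VERDICT (by name: the statement is the Claim_ definition above) =====
theorem all_players_are_different_spec : Claim_equal_all_players_are_different := by
  intro l1 l2 l3 _ _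
  exact pv_main l1 l2 l3
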